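-- pv_equiv track=rewrite | github.com/mr-pyle/Tron-2026 | new.py | calculate_territory
-- ===== SOURCE A (Python) =====
-- from collections import deque
--
-- def calculate_territory(my_future_pos, enemies, board, grid_dim):
--     queue = deque()
--     visited = {}
--     queue.append((my_future_pos, 0, 'ME'))
--     visited[my_future_pos] = 'ME'
--
--     for e in enemies:
--         queue.append((e, 0, 'ENEMY'))
--         visited[e] = 'ENEMY'
--
--     my_territory = 0
--     while queue:
--         (cx, cy), dist, owner = queue.popleft()
--         if owner == 'ME':
--             my_territory += 1
--         for dx, dy in [(0, 1), (0, -1), (1, 0), (-1, 0)]: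
--             nx, ny = cx + dx, cy + dy
--             if 0 <= nx < grid_dim and 0 <= ny < grid_dim and (nx, ny) not in board and (nx, ny) not in visited:
--                 visited[(nx, ny)] = owner
--                 queue.append(((nx, ny), dist + 1, owner))
--     return my_territory
-- ===== SOURCE B (Python) =====
-- def calculate_territory(my_future_pos, enemies, board, grid_dim):
--     # Level-synchronous flood fill: no queue, no per-node owner/dist tags.
--     # Each round expands the ME frontier first, then the enemy frontier,
--     # so ME wins every equal-distance tie exactly like the interleaved queue.
--     blocked = set(board)
--     claimed = {my_future_pos}
--     claimed.update(enemies)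
--     me_f = [my_future_pos]
--     en_f = list(enemies)
--     count = 1
--
--     def expand(frontier):
--         new = []
--         for (x, y) in frontier:
--             for dx, dy in ((0, 1), (0, -1), (1, 0), (-1, 0)):
--                 n = (x + dx, y + dy)
--                 if 0 <= n[0] < grid_dim and 0 <= n[1] < grid_dim \
--                         and n not in blocked and n not in claimed:
--                     claimed.add(n)
--                     new.append(n)
--         return new
--
--     while me_f or en_f:
--         me_f = expand(me_f)
--         count += len(me_f)
--         en_f = expand(en_f)
--     return count
-- ===== Notes on version B (the rewrite author's own statement) =====
-- stated objective: alternative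
-- what changed: Replaces the single interleaved owner-tagged BFS deque (per-node (pos,dist,owner) records and a visited dict) by a level-synchronous flood fill that alternately expands a ME frontier and an enemy frontier round by round, counting ME territory as 1 plus the sizes of the ME levels, with the board kept in a set instead of being linearly re-scanned per neighbour.
import Mathlib
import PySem

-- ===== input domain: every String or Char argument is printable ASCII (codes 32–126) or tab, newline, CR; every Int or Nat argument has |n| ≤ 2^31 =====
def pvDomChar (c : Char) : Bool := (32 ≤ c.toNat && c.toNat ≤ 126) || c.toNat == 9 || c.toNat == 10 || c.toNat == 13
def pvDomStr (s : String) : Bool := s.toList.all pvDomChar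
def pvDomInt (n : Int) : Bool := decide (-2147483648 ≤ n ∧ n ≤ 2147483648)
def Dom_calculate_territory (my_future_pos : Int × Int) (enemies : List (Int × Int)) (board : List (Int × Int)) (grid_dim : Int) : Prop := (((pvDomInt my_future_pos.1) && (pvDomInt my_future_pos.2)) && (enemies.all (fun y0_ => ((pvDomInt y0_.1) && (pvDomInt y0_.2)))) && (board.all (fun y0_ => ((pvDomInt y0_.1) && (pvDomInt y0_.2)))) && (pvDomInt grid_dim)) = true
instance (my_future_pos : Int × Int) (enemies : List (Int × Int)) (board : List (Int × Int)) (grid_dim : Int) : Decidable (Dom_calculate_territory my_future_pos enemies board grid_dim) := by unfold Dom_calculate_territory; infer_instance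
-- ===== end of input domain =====

-- B replaces A's single interleaved owner-tagged BFS queue with a level-synchronous
-- flood fill (expand the ME frontier, then the enemy frontier, round by round),
-- keeping the board in a set; objective: alternative (a genuinely different
-- decomposition of the same search, at similar cost).
-- Python's dict/set are hash tables; both ports model them with Std.HashMap/Std.HashSet
-- (exact for the operations used: insert and membership; iteration order is never used).

def pvDirs : List (Int × Int) := [(0, 1), (0, -1), (1, 0), (-1, 0)]

-- ===== PORT A =====
-- the inner `for dx, dy in [...]` loop of A: walks the four directions, appending
-- fresh valid neighbours to the queue and marking them visited
def pvPushA (board : List (Int × Int)) (grid_dim : Int) (owner : String) (dist : Int) (c : Int × Int) :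
    List (Int × Int) →
    List ((Int × Int) × Int × String) × Std.HashMap (Int × Int) String →
    List ((Int × Int) × Int × String) × Std.HashMap (Int × Int) String
  | [], st => st
  | d :: ds, st =>
      let nx := c.1 + d.1
      let ny := c.2 + d.2
      let st' :=
        if 0 ≤ nx ∧ nx < grid_dim ∧ 0 ≤ ny ∧ ny < grid_dim ∧ (nx, ny) ∉ board ∧
            st.2.contains (nx, ny) = false
        then (st.1 ++ [((nx, ny), dist + 1, owner)], st.2.insert (nx, ny) owner)
        else st
      pvPushA board grid_dim owner dist c ds st'

-- A's `while queue:` loop; the fuel is an upper bound on the number of pops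
-- (1 + len(enemies) + one per claimed in-grid cell), proved sufficient below
def pvLoopA (board : List (Int × Int)) (grid_dim : Int) :
    Nat → List ((Int × Int) × Int × String) → Std.HashMap (Int × Int) String → Int → Int
  | 0, _, _, cnt => cnt
  | _ + 1, [], _, cnt => cnt
  | fuel + 1, entry :: rest, visited, cnt =>
      let cnt' := if entry.2.2 == "ME" then cnt + 1 else cnt
      let st := pvPushA board grid_dim entry.2.2 entry.2.1 entry.1 pvDirs (rest, visited)
      pvLoopA board grid_dim fuel st.1 st.2 cnt'

def calculate_territory (my_future_pos : Int × Int) (enemies : List (Int × Int)) (board : List (Int × Int)) (grid_dim : Int) : Int :=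
  let init := enemies.foldl
      (fun st e => (st.1 ++ [(e, (0 : Int), "ENEMY")], st.2.insert e "ENEMY"))
      ([(my_future_pos, (0 : Int), "ME")],
        (∅ : Std.HashMap (Int × Int) String).insert my_future_pos "ME")
  pvLoopA board grid_dim (2 + enemies.length + grid_dim.toNat * grid_dim.toNat) init.1 init.2 0

-- ===== PORT B =====
-- B's inner direction loop: appends fresh valid neighbours to `new` and claims them
def pvPushB (blocked : Std.HashSet (Int × Int)) (grid_dim : Int) (c : Int × Int) :
    List (Int × Int) →
    List (Int × Int) × Std.HashSet (Int × Int) →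
    List (Int × Int) × Std.HashSet (Int × Int)
  | [], st => st
  | d :: ds, st =>
      let n := (c.1 + d.1, c.2 + d.2)
      let st' :=
        if 0 ≤ n.1 ∧ n.1 < grid_dim ∧ 0 ≤ n.2 ∧ n.2 < grid_dim ∧
            blocked.contains n = false ∧ st.2.contains n = false
        then (st.1 ++ [n], st.2.insert n)
        else st
      pvPushB blocked grid_dim c ds st'

-- B's `expand(frontier)`
def pvExpandB (blocked : Std.HashSet (Int × Int)) (grid_dim : Int)
    (frontier : List (Int × Int)) (claimed : Std.HashSet (Int × Int)) :
    List (Int × Int) × Std.HashSet (Int × Int) :=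
  frontier.foldl (fun st c => pvPushB blocked grid_dim c pvDirs st) ([], claimed)

-- B's `while me_f or en_f:` loop; fuel bounds the number of rounds
def pvLoopB (blocked : Std.HashSet (Int × Int)) (grid_dim : Int) :
    Nat → List (Int × Int) → List (Int × Int) → Std.HashSet (Int × Int) → Int → Int
  | 0, _, _, _, count => count
  | fuel + 1, me_f, en_f, claimed, count =>
      if me_f.isEmpty && en_f.isEmpty then count
      else
        let m := pvExpandB blocked grid_dim me_f claimed
        let count' := count + m.1.length
        let e := pvExpandB blocked grid_dim en_f m.2
        pvLoopB blocked grid_dim fuel m.1 e.1 e.2 count'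

def calculate_territory_alt (my_future_pos : Int × Int) (enemies : List (Int × Int)) (board : List (Int × Int)) (grid_dim : Int) : Int :=
  let blocked := Std.HashSet.ofList board
  let claimed := enemies.foldl (fun s e => s.insert e)
      ((∅ : Std.HashSet (Int × Int)).insert my_future_pos)
  pvLoopB blocked grid_dim (2 + enemies.length + grid_dim.toNat * grid_dim.toNat)
    [my_future_pos] enemies claimed 1

-- ===== PRECONDITION & SPEC =====
def Spec_calculate_territory (my_future_pos : Int × Int) (enemies : List (Int × Int)) (board : List (Int × Int)) (grid_dim : Int) (out : Int) : Prop := out = calculate_territory_alt my_future_pos enemies board grid_dim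
instance (my_future_pos : Int × Int) (enemies : List (Int × Int)) (board : List (Int × Int)) (grid_dim : Int) (out : Int) : Decidable (Spec_calculate_territory my_future_pos enemies board grid_dim out) := by unfold Spec_calculate_territory; infer_instance

-- ===== CLAIM (what is proved, stated in full; the proofs are below) =====
def Claim_equal_calculate_territory : Prop := ∀ (my_future_pos : Int × Int) (enemies : List (Int × Int)) (board : List (Int × Int)) (grid_dim : Int), Dom_calculate_territory my_future_pos enemies board grid_dim → Spec_calculate_territory my_future_pos enemies board grid_dim (calculate_territory my_future_pos enemies board grid_dim)

-- ===== LEMMAS AND PROOFS =====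

-- number of in-grid, non-board, not-yet-visited cells (the proofs' induction measure)
noncomputable def pvU (board : List (Int × Int)) (g : Int) (v : Std.HashMap (Int × Int) String) : Nat :=
  (((Finset.Ico (0 : Int) g) ×ˢ (Finset.Ico (0 : Int) g)).filter
    (fun p => p ∉ board ∧ v.contains p = false)).card

lemma pvU_insert (board : List (Int × Int)) (g : Int) (v : Std.HashMap (Int × Int) String)
    (n : Int × Int) (w : String)
    (h1 : 0 ≤ n.1) (h2 : n.1 < g) (h3 : 0 ≤ n.2) (h4 : n.2 < g)
    (h5 : n ∉ board) (h6 : v.contains n = false) :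
    pvU board g (v.insert n w) + 1 = pvU board g v := by
  unfold pvU
  have hset :
      (((Finset.Ico (0 : Int) g) ×ˢ (Finset.Ico (0 : Int) g)).filter
        (fun p => p ∉ board ∧ (v.insert n w).contains p = false)) =
      (((Finset.Ico (0 : Int) g) ×ˢ (Finset.Ico (0 : Int) g)).filter
        (fun p => p ∉ board ∧ v.contains p = false)).erase n := by
    ext p
    simp only [Finset.mem_erase, Finset.mem_filter, Finset.mem_product, Finset.mem_Ico,
      Std.HashMap.contains_insert, Bool.or_eq_false_iff, beq_eq_false_iff_ne, ne_eq,
      ne_comm]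
    tauto
  rw [hset, Finset.card_erase_add_one]
  simp only [Finset.mem_filter, Finset.mem_product, Finset.mem_Ico]
  exact ⟨⟨⟨h1, h2⟩, h3, h4⟩, h5, h6⟩

lemma pvU_le (board : List (Int × Int)) (g : Int) (v : Std.HashMap (Int × Int) String) :
    pvU board g v ≤ g.toNat * g.toNat := by
  unfold pvU
  calc _ ≤ ((Finset.Ico (0 : Int) g) ×ˢ (Finset.Ico (0 : Int) g)).card :=
        Finset.card_filter_le _ _
    _ = g.toNat * g.toNat := by
        rw [Finset.card_product, Int.card_Ico]; simp

lemma pvLoopA_nil (board : List (Int × Int)) (g : Int) (f : Nat)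
    (v : Std.HashMap (Int × Int) String) (c : Int) :
    pvLoopA board g f [] v c = c := by
  cases f <;> rfl

lemma pvLoopB_nil (blocked : Std.HashSet (Int × Int)) (g : Int) (f : Nat)
    (cl : Std.HashSet (Int × Int)) (c : Int) :
    pvLoopB blocked g f [] [] cl c = c := by
  cases f <;> rfl

-- one popped cell: A's direction loop and B's direction loop claim the same fresh
-- neighbours, in the same order, and keep visited/claimed in membership agreement
lemma push_corr (board : List (Int × Int)) (g : Int) (owner : String)
    (blocked : Std.HashSet (Int × Int))
    (hb : ∀ p : Int × Int, blocked.contains p = true ↔ p ∈ board) :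
    ∀ (ds : List (Int × Int)) (c : Int × Int) (dist : Int)
      (qa : List ((Int × Int) × Int × String)) (nb : List (Int × Int))
      (v : Std.HashMap (Int × Int) String) (cl : Std.HashSet (Int × Int)),
      (∀ p : Int × Int, v.contains p = cl.contains p) →
      ∃ (news : List (Int × Int)) (v' : Std.HashMap (Int × Int) String)
        (cl' : Std.HashSet (Int × Int)),
        pvPushA board g owner dist c ds (qa, v) =
          (qa ++ news.map (fun p => (p, dist + 1, owner)), v') ∧
        pvPushB blocked g c ds (nb, cl) = (nb ++ news, cl') ∧
        (∀ p : Int × Int, v'.contains p = cl'.contains p) ∧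
        pvU board g v = pvU board g v' + news.length := by
  intro ds
  induction ds with
  | nil =>
      intro c dist qa nb v cl hinv
      exact ⟨[], v, cl, by simp [pvPushA], by simp [pvPushB], hinv, by simp⟩
  | cons d ds ih =>
      intro c dist qa nb v cl hinv
      have hnbd : (blocked.contains (c.1 + d.1, c.2 + d.2) = false) ↔
          (c.1 + d.1, c.2 + d.2) ∉ board := by
        rw [← hb]; simp
      by_cases hc : (0 ≤ c.1 + d.1 ∧ c.1 + d.1 < g ∧ 0 ≤ c.2 + d.2 ∧ c.2 + d.2 < g ∧
          (c.1 + d.1, c.2 + d.2) ∉ board ∧ v.contains (c.1 + d.1, c.2 + d.2) = false)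
      case pos =>
        have hcB : (0 ≤ c.1 + d.1 ∧ c.1 + d.1 < g ∧ 0 ≤ c.2 + d.2 ∧ c.2 + d.2 < g ∧
            blocked.contains (c.1 + d.1, c.2 + d.2) = false ∧
            cl.contains (c.1 + d.1, c.2 + d.2) = false) := by
          refine ⟨hc.1, hc.2.1, hc.2.2.1, hc.2.2.2.1, hnbd.mpr hc.2.2.2.2.1, ?_⟩
          rw [← hinv]; exact hc.2.2.2.2.2
        have hinv' : ∀ p : Int × Int,
            (v.insert (c.1 + d.1, c.2 + d.2) owner).contains p =
            (cl.insert (c.1 + d.1, c.2 + d.2)).contains p := by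
          intro p
          rw [Std.HashMap.contains_insert, Std.HashSet.contains_insert, hinv p]
        obtain ⟨news, v', cl', hA, hB, hinv2, hU⟩ :=
          ih c dist (qa ++ [((c.1 + d.1, c.2 + d.2), dist + 1, owner)])
            (nb ++ [(c.1 + d.1, c.2 + d.2)])
            (v.insert (c.1 + d.1, c.2 + d.2) owner)
            (cl.insert (c.1 + d.1, c.2 + d.2)) hinv'
        refine ⟨(c.1 + d.1, c.2 + d.2) :: news, v', cl', ?_, ?_, hinv2, ?_⟩
        · rw [pvPushA]
          simp only [if_pos hc]
          rw [hA]; simp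
        · rw [pvPushB]
          simp only [if_pos hcB]
          rw [hB]; simp
        · have := pvU_insert board g v (c.1 + d.1, c.2 + d.2) owner
            hc.1 hc.2.1 hc.2.2.1 hc.2.2.2.1 hc.2.2.2.2.1 hc.2.2.2.2.2
          simp only [List.length_cons]
          omega
      case neg =>
        have hcB : ¬ (0 ≤ c.1 + d.1 ∧ c.1 + d.1 < g ∧ 0 ≤ c.2 + d.2 ∧ c.2 + d.2 < g ∧
            blocked.contains (c.1 + d.1, c.2 + d.2) = false ∧
            cl.contains (c.1 + d.1, c.2 + d.2) = false) := by
          intro h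
          exact hc ⟨h.1, h.2.1, h.2.2.1, h.2.2.2.1, hnbd.mp h.2.2.2.2.1,
            by rw [hinv]; exact h.2.2.2.2.2⟩
        obtain ⟨news, v', cl', hA, hB, hinv2, hU⟩ := ih c dist qa nb v cl hinv
        refine ⟨news, v', cl', ?_, ?_, hinv2, hU⟩
        · rw [pvPushA]; simp only [if_neg hc]; exact hA
        · rw [pvPushB]; simp only [if_neg hcB]; exact hB

-- a whole uniform-owner block of A's queue behaves like one frontier expansion of B
lemma block_corr (board : List (Int × Int)) (g : Int) (owner : String)
    (blocked : Std.HashSet (Int × Int))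
    (hb : ∀ p : Int × Int, blocked.contains p = true ↔ p ∈ board) :
    ∀ (bp : List ((Int × Int) × Int)) (fA : Nat)
      (qtail : List ((Int × Int) × Int × String)) (nb : List (Int × Int))
      (v : Std.HashMap (Int × Int) String) (cl : Std.HashSet (Int × Int)) (cnt : Int),
      (∀ p : Int × Int, v.contains p = cl.contains p) →
      ∃ (news : List ((Int × Int) × Int)) (v' : Std.HashMap (Int × Int) String)
        (cl' : Std.HashSet (Int × Int)),
        pvLoopA board g (fA + bp.length)
            (bp.map (fun q => (q.1, q.2, owner)) ++ qtail) v cnt =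
          pvLoopA board g fA (qtail ++ news.map (fun q => (q.1, q.2, owner))) v'
            (if owner == "ME" then cnt + bp.length else cnt) ∧
        List.foldl (fun st c => pvPushB blocked g c pvDirs st) (nb, cl) (bp.map Prod.fst) =
          (nb ++ news.map Prod.fst, cl') ∧
        (∀ p : Int × Int, v'.contains p = cl'.contains p) ∧
        pvU board g v = pvU board g v' + news.length := by
  intro bp
  induction bp with
  | nil =>
      intro fA qtail nb v cl cnt hinv
      refine ⟨[], v, cl, ?_, by simp, hinv, by simp⟩
      simp
  | cons q bp ih =>
      intro fA qtail nb v cl cnt hinv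
      obtain ⟨newsc, v1, cl1, hA1, hB1, hinv1, hU1⟩ :=
        push_corr board g owner blocked hb pvDirs q.1 q.2
          (bp.map (fun r => (r.1, r.2, owner)) ++ qtail) nb v cl hinv
      obtain ⟨news', v', cl', hA2, hB2, hinv2, hU2⟩ :=
        ih fA (qtail ++ (newsc.map (fun p => (p, q.2 + 1))).map (fun r => (r.1, r.2, owner)))
          (nb ++ newsc) v1 cl1 (if owner == "ME" then cnt + 1 else cnt) hinv1
      refine ⟨newsc.map (fun p => (p, q.2 + 1)) ++ news', v', cl', ?_, ?_, hinv2, ?_⟩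
      · have hlen : fA + (q :: bp).length = (fA + bp.length) + 1 := by
          simp only [List.length_cons]; omega
        rw [hlen, List.map_cons, List.cons_append, pvLoopA]
        simp only []
        rw [hA1]
        have hq : (bp.map (fun r => (r.1, r.2, owner)) ++ qtail) ++
            newsc.map (fun p => (p, q.2 + 1, owner)) =
            bp.map (fun r => (r.1, r.2, owner)) ++
              (qtail ++ (newsc.map (fun p => (p, q.2 + 1))).map (fun r => (r.1, r.2, owner))) := by
          simp [List.map_map, Function.comp]
        rw [hq, hA2]
        have hcnt : (if owner == "ME" then (if owner == "ME" then cnt + 1 else cnt) + ↑bp.length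
            else (if owner == "ME" then cnt + 1 else cnt)) =
            (if owner == "ME" then cnt + ↑(q :: bp).length else cnt) := by
          by_cases howner : (owner == "ME") = true
          · simp only [howner, if_true, List.length_cons]
            push_cast
            ring
          · simp only [howner, if_false, Bool.false_eq_true]
        rw [hcnt]
        simp [List.map_map, Function.comp_def, List.append_assoc]
      · rw [List.map_cons, List.foldl_cons, hB1, hB2]
        simp [List.map_map, Function.comp_def, List.append_assoc]
      · simp only [List.length_append, List.length_map]
        omega

-- main correspondence: at every round boundary A's queue is the ME frontier then the
-- enemy frontier, and A's count lags B's by the length of the ME frontier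
lemma main_corr (board : List (Int × Int)) (g : Int)
    (blocked : Std.HashSet (Int × Int))
    (hb : ∀ p : Int × Int, blocked.contains p = true ↔ p ∈ board) :
    ∀ (u : Nat) (mePairs enPairs : List ((Int × Int) × Int))
      (v : Std.HashMap (Int × Int) String) (cl : Std.HashSet (Int × Int))
      (cntA : Int) (fA fB : Nat),
      (∀ p : Int × Int, v.contains p = cl.contains p) →
      pvU board g v = u →
      mePairs.length + enPairs.length + u ≤ fA →
      u + 1 ≤ fB →
      pvLoopA board g fA
          (mePairs.map (fun q => (q.1, q.2, "ME")) ++ enPairs.map (fun q => (q.1, q.2, "ENEMY")))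
          v cntA =
        pvLoopB blocked g fB (mePairs.map Prod.fst) (enPairs.map Prod.fst) cl
          (cntA + mePairs.length) := by
  intro u
  induction u using Nat.strong_induction_on with
  | _ u IH =>
    intro mePairs enPairs v cl cntA fA fB hinv hu hfA hfB
    by_cases hmt : mePairs = [] ∧ enPairs = []
    · obtain ⟨rfl, rfl⟩ := hmt
      simp [pvLoopA_nil, pvLoopB_nil]
    · obtain ⟨fB', rfl⟩ : ∃ fB', fB = fB' + 1 := by
        cases fB with
        | zero => omega
        | succ k => exact ⟨k, rfl⟩
      have hfa2 : fA = (fA - mePairs.length - enPairs.length + enPairs.length) + mePairs.length := by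
        omega
      rw [hfa2]
      obtain ⟨newsME, v1, cl1, hA1, hB1, hinv1, hU1⟩ :=
        block_corr board g "ME" blocked hb mePairs
          (fA - mePairs.length - enPairs.length + enPairs.length)
          (enPairs.map (fun q => (q.1, q.2, "ENEMY"))) [] v cl cntA hinv
      obtain ⟨newsEN, v2, cl2, hA2, hB2, hinv2, hU2⟩ :=
        block_corr board g "ENEMY" blocked hb enPairs
          (fA - mePairs.length - enPairs.length)
          (newsME.map (fun q => (q.1, q.2, "ME"))) [] v1 cl1
          (cntA + mePairs.length) hinv1
      simp only [show (("ME" : String) == "ME") = true from rfl,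
        show (("ENEMY" : String) == "ME") = false from rfl, if_true, if_false,
        Bool.false_eq_true] at hA1 hA2
      rw [hA1, hA2]
      have hrhs : pvLoopB blocked g (fB' + 1) (mePairs.map Prod.fst) (enPairs.map Prod.fst) cl
          (cntA + mePairs.length) =
          pvLoopB blocked g fB' (newsME.map Prod.fst) (newsEN.map Prod.fst) cl2
            ((cntA + mePairs.length) + newsME.length) := by
        rw [pvLoopB]
        have hne : ((mePairs.map Prod.fst).isEmpty && (enPairs.map Prod.fst).isEmpty) = false := by
          rcases not_and_or.mp hmt with h | h
          · simp [List.isEmpty_eq_false_iff, h]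
          · simp [List.isEmpty_eq_false_iff, h]
        rw [hne]
        simp only [Bool.false_eq_true, if_false]
        show pvLoopB blocked g fB'
            (pvExpandB blocked g (mePairs.map Prod.fst) cl).1 _ _ _ = _
        unfold pvExpandB
        rw [hB1, hB2]
        simp
      rw [hrhs]
      by_cases hend : newsME = [] ∧ newsEN = []
      · obtain ⟨rfl, rfl⟩ := hend
        simp [pvLoopA_nil, pvLoopB_nil]
      · have hpos : 0 < newsME.length + newsEN.length := by
          rcases not_and_or.mp hend with h | h
          · have := List.length_pos_iff.mpr h; omega
          · have := List.length_pos_iff.mpr h; omega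
        have hlt : pvU board g v2 < u := by omega
        have := IH (pvU board g v2) hlt newsME newsEN v2 cl2
          (cntA + mePairs.length) (fA - mePairs.length - enPairs.length) fB' hinv2 rfl
          (by omega) (by omega)
        rw [this]

-- visited and claimed agree in membership after seeding both with the sources
lemma pvInit_inv :
    ∀ (enemies : List (Int × Int)) (d : Std.HashMap (Int × Int) String)
      (s : Std.HashSet (Int × Int)),
      (∀ p : Int × Int, d.contains p = s.contains p) →
      ∀ p : Int × Int,
        (enemies.foldl (fun d e => d.insert e "ENEMY") d).contains p =
        (enemies.foldl (fun s e => s.insert e) s).contains p := by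
  intro enemies
  induction enemies with
  | nil => intro d s h p; exact h p
  | cons e es ih =>
      intro d s h p
      refine ih (d.insert e "ENEMY") (s.insert e) ?_ p
      intro q
      rw [Std.HashMap.contains_insert, Std.HashSet.contains_insert, h q]

-- ===== VERDICT (by name: the statement is the Claim_ definition above) =====
theorem calculate_territory_spec : Claim_equal_calculate_territory := by
  intro mp enemies board g _
  unfold Spec_calculate_territory calculate_territory calculate_territory_alt
  have hsplit := PySem.List.foldl_prod_mk (fun q (e : Int × Int) => q ++ [(e, (0 : Int), "ENEMY")])
    (fun (d : Std.HashMap (Int × Int) String) e => d.insert e "ENEMY") enemies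
    [(mp, (0 : Int), "ME")] ((∅ : Std.HashMap (Int × Int) String).insert mp "ME")
  beta_reduce at hsplit
  rw [hsplit, PySem.List.foldl_append_singleton_eq_map]
  have hb : ∀ p : Int × Int, (Std.HashSet.ofList board).contains p = true ↔ p ∈ board := by
    intro p
    rw [← Std.HashSet.mem_iff_contains, Std.HashSet.mem_ofList, List.contains_iff_mem]
  have hinv0 : ∀ p : Int × Int,
      (enemies.foldl (fun d e => d.insert e "ENEMY")
        ((∅ : Std.HashMap (Int × Int) String).insert mp "ME")).contains p =
      (enemies.foldl (fun s e => s.insert e)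
        ((∅ : Std.HashSet (Int × Int)).insert mp)).contains p := by
    refine pvInit_inv enemies _ _ ?_
    intro q
    rw [Std.HashMap.contains_insert, Std.HashSet.contains_insert]
    simp
  have hfuel := pvU_le board g
    (enemies.foldl (fun d e => d.insert e "ENEMY")
      ((∅ : Std.HashMap (Int × Int) String).insert mp "ME"))
  have hmain := main_corr board g (Std.HashSet.ofList board) hb
    (pvU board g (enemies.foldl (fun d e => d.insert e "ENEMY")
      ((∅ : Std.HashMap (Int × Int) String).insert mp "ME")))
    [(mp, (0 : Int))] (enemies.map (fun e => (e, (0 : Int))))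
    (enemies.foldl (fun d e => d.insert e "ENEMY")
      ((∅ : Std.HashMap (Int × Int) String).insert mp "ME"))
    (enemies.foldl (fun s e => s.insert e) ((∅ : Std.HashSet (Int × Int)).insert mp))
    0 (2 + enemies.length + g.toNat * g.toNat) (2 + enemies.length + g.toNat * g.toNat)
    hinv0 rfl
    (by simp only [List.length_cons, List.length_nil, List.length_map]; omega)
    (by omega)
  simpa [Function.comp_def] using hmain
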